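-- pv_equiv track=rewrite | github.com/khalidsaif912/roster-site | generate_and_send.py | add_months
-- ===== SOURCE A (Python) =====
-- def add_months(year: int, month: int, delta: int) -> tuple[int, int]:
--     y = year
--     m = month + delta
--     while m <= 0:
--         y -= 1
--         m += 12
--     while m > 12:
--         y += 1
--         m -= 12
--     return y, m
-- ===== SOURCE B (Python) =====
-- def add_months(year: int, month: int, delta: int) -> tuple[int, int]:
--     idx = month + delta - 1
--     return year + idx // 12, idx % 12 + 1
-- ===== Notes on version B (the rewrite author's own statement) =====
-- stated objective: faster
-- what changed: Replaced the two normalization while-loops with a single constant-time floor-division/modulo formula on the 0-based month index.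
import Mathlib
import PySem

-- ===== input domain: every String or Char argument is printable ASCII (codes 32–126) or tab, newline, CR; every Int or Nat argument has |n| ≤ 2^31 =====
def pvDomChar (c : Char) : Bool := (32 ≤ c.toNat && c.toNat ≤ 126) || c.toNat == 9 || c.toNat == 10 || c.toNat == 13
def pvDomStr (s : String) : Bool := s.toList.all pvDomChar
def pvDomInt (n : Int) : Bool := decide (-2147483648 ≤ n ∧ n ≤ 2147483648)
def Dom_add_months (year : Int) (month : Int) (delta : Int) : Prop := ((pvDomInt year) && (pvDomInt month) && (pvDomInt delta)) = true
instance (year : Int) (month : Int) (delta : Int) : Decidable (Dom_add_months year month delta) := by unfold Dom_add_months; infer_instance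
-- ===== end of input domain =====

-- B replaces A's two normalization while-loops with one constant-time floor-division/modulo formula (same return values).

-- ===== PORT A =====
-- while m <= 0: y -= 1; m += 12
def add_months_up (y m : Int) : Int × Int :=
  if m ≤ 0 then add_months_up (y - 1) (m + 12) else (y, m)
termination_by (1 - m).toNat
decreasing_by omega

-- while m > 12: y += 1; m -= 12
def add_months_down (y m : Int) : Int × Int :=
  if m > 12 then add_months_down (y + 1) (m - 12) else (y, m)
termination_by m.toNat
decreasing_by omega

def add_months (year : Int) (month : Int) (delta : Int) : Int × Int :=
  let p := add_months_up year (month + delta)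
  add_months_down p.1 p.2

-- ===== PORT B =====
def add_months_alt (year : Int) (month : Int) (delta : Int) : Int × Int :=
  let idx := month + delta - 1
  (year + PySem.Int.floordiv idx 12, PySem.Int.mod idx 12 + 1)

-- ===== PRECONDITION & SPEC =====
def Spec_add_months (year : Int) (month : Int) (delta : Int) (out : Int × Int) : Prop := out = add_months_alt year month delta
instance (year : Int) (month : Int) (delta : Int) (out : Int × Int) : Decidable (Spec_add_months year month delta out) := by unfold Spec_add_months; infer_instance

-- ===== CLAIM (what is proved, stated in full; the proofs are below) =====
def Claim_equal_add_months : Prop := ∀ (year : Int) (month : Int) (delta : Int), Dom_add_months year month delta → Spec_add_months year month delta (add_months year month delta)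

-- ===== LEMMAS AND PROOFS =====
-- the closed form both loops normalize to
def pvT (y m : Int) : Int × Int := (y + (m - 1) / 12, (m - 1) % 12 + 1)

theorem pvT_up (y m : Int) : pvT (y - 1) (m + 12) = pvT y m := by
  unfold pvT
  simp only [Prod.mk.injEq]
  constructor <;> omega

theorem pvT_down (y m : Int) : pvT (y + 1) (m - 12) = pvT y m := by
  unfold pvT
  simp only [Prod.mk.injEq]
  constructor <;> omega

theorem down_eq (y m : Int) (h : 1 ≤ m) : add_months_down y m = pvT y m := by
  unfold add_months_down
  split
  · rw [down_eq (y + 1) (m - 12) (by omega), pvT_down]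
  · unfold pvT
    simp only [Prod.mk.injEq]
    constructor <;> omega
termination_by m.toNat
decreasing_by omega

theorem up_eq (y m : Int) :
    1 ≤ (add_months_up y m).2 ∧ pvT (add_months_up y m).1 (add_months_up y m).2 = pvT y m := by
  unfold add_months_up
  split
  · obtain ⟨h1, h2⟩ := up_eq (y - 1) (m + 12)
    exact ⟨h1, by rw [h2, pvT_up]⟩
  · exact ⟨by omega, rfl⟩
termination_by (1 - m).toNat
decreasing_by omega

-- ===== VERDICT (by name: the statement is the Claim_ definition above) =====
theorem add_months_spec : Claim_equal_add_months := by
  intro year month delta _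
  unfold Spec_add_months add_months add_months_alt
  obtain ⟨h1, h2⟩ := up_eq year (month + delta)
  rw [down_eq _ _ h1, h2]
  simp only [PySem.Int.floordiv_eq_ediv_of_pos (show (0:Int) < 12 by norm_num),
    PySem.Int.mod_eq_emod_of_pos (show (0:Int) < 12 by norm_num)]
  rfl
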